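-- pv_equiv track=rewrite | github.com/arnbsen/ImageProcessingPython | supportLibrary.py | convertImageToBinary
-- ===== SOURCE A (Python) =====
-- def convertImageToBinary(lbl):
--     binImage = []
--     binImageInv = []
--     for i in range(0, len(lbl)):
--         tmp = []
--         tmp2 = []
--         for j in range(0, len(lbl[0])):
--             if lbl[i][j] == 0:
--                 tmp.append(0)
--                 tmp2.append(1)
--             else:
--                 tmp.append(1)
--                 tmp2.append(0)
--         binImage.append(tmp)
--         binImageInv.append(tmp2)
--     return binImage, binImageInv
-- ===== SOURCE B (Python) =====
-- def convertImageToBinary(lbl):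
--     width = len(lbl[0]) if lbl else 0
--     binImage = [[0 if row[j] == 0 else 1 for j in range(width)] for row in lbl]
--     binImageInv = [[1 - x for x in row] for row in binImage]
--     return binImage, binImageInv
-- ===== Notes on version B (the rewrite author's own statement) =====
-- stated objective: simpler
-- what changed: Replaces A's single interleaved pass with explicit accumulators by a comprehension building binImage, then a second pass deriving binImageInv as 1 - x from binImage instead of re-testing lbl.
import Mathlib
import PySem

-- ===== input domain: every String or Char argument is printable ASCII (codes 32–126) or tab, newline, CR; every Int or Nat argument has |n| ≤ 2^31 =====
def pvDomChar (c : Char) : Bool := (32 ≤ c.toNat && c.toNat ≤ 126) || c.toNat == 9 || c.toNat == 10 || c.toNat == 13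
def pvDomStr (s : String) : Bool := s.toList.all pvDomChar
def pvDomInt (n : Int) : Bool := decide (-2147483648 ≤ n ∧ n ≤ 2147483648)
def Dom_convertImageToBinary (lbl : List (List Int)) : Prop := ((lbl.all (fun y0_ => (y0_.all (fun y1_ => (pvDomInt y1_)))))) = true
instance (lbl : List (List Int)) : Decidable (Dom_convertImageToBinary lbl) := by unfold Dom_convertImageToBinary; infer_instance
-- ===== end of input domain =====

-- B builds binImage in one comprehension pass and derives the inverse from binImage (1 - x)
-- in a second pass, instead of A's single interleaved pass with explicit accumulators.
-- Pre_ excludes ragged inputs where some row is shorter than row 0, on which Python A raises IndexError.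
-- ===== PORT A =====
def convertImageToBinary (lbl : List (List Int)) : List (List Int) × List (List Int) :=
  lbl.foldl (fun (acc : List (List Int) × List (List Int)) row =>
    let p := (List.range (lbl.headD []).length).foldl
      (fun (q : List Int × List Int) j =>
        if row.getD j 0 = 0 then (q.1 ++ [0], q.2 ++ [1]) else (q.1 ++ [1], q.2 ++ [0]))
      ([], [])
    (acc.1 ++ [p.1], acc.2 ++ [p.2])) ([], [])

-- ===== PORT B =====
def convertImageToBinary_alt (lbl : List (List Int)) : List (List Int) × List (List Int) :=
  let w := (lbl.headD []).length
  let binImage := lbl.map (fun row => (List.range w).map (fun j => if row.getD j 0 = 0 then (0 : Int) else 1))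
  (binImage, binImage.map (fun r => r.map (fun x => 1 - x)))

-- ===== PRECONDITION & SPEC =====
-- Pre_ excludes ragged inputs where some row is shorter than row 0: Python A raises IndexError there (so does B).
def Pre_convertImageToBinary (lbl : List (List Int)) : Prop :=
  ∀ row ∈ lbl, (lbl.headD []).length ≤ row.length
instance (lbl : List (List Int)) : Decidable (Pre_convertImageToBinary lbl) := by
  unfold Pre_convertImageToBinary; infer_instance
def pvWitness_convertImageToBinary : List (List Int) := [[0, 3], [2, 0]]
def Spec_convertImageToBinary (lbl : List (List Int)) (out : List (List Int) × List (List Int)) : Prop := out = convertImageToBinary_alt lbl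
instance (lbl : List (List Int)) (out : List (List Int) × List (List Int)) : Decidable (Spec_convertImageToBinary lbl out) := by unfold Spec_convertImageToBinary; infer_instance

-- ===== CLAIM (what is proved, stated in full; the proofs are below) =====
def Claim_equal_convertImageToBinary : Prop := ∀ (lbl : List (List Int)), Dom_convertImageToBinary lbl → Pre_convertImageToBinary lbl → Spec_convertImageToBinary lbl (convertImageToBinary lbl)

-- ===== LEMMAS AND PROOFS =====
theorem cib_inner (row : List Int) (js : List Nat) (a b : List Int) :
    js.foldl (fun (q : List Int × List Int) j =>
        if row.getD j 0 = 0 then (q.1 ++ [0], q.2 ++ [1]) else (q.1 ++ [1], q.2 ++ [0])) (a, b)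
    = (a ++ js.map (fun j => if row.getD j 0 = 0 then (0 : Int) else 1),
       b ++ js.map (fun j => (1 : Int) - (if row.getD j 0 = 0 then 0 else 1))) := by
  induction js generalizing a b with
  | nil => simp
  | cons j js ih =>
    simp only [List.foldl_cons, List.map_cons]
    split_ifs with h <;> · rw [ih]; simp

theorem cib_outer (w : Nat) (rows : List (List Int)) (a b : List (List Int)) :
    rows.foldl (fun (acc : List (List Int) × List (List Int)) row =>
      let p := (List.range w).foldl
        (fun (q : List Int × List Int) j =>
          if row.getD j 0 = 0 then (q.1 ++ [0], q.2 ++ [1]) else (q.1 ++ [1], q.2 ++ [0]))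
        ([], [])
      (acc.1 ++ [p.1], acc.2 ++ [p.2])) (a, b)
    = (a ++ rows.map (fun row => (List.range w).map (fun j => if row.getD j 0 = 0 then (0 : Int) else 1)),
       b ++ rows.map (fun row => (List.range w).map (fun j => (1 : Int) - (if row.getD j 0 = 0 then 0 else 1)))) := by
  induction rows generalizing a b with
  | nil => simp
  | cons r rs ih =>
    simp only [List.foldl_cons, List.map_cons]
    rw [cib_inner, ih]
    simp

-- ===== VERDICT (by name: the statement is the Claim_ definition above) =====
theorem convertImageToBinary_spec : Claim_equal_convertImageToBinary := by
  intro lbl _ _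
  unfold Spec_convertImageToBinary convertImageToBinary convertImageToBinary_alt
  rw [cib_outer]
  simp [List.map_map, Function.comp]
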